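-- pv_equiv track=rewrite | github.com/ericstevensjr/aiproject3 | src/logic.py | interpretPreferenceRule
-- ===== SOURCE A (Python) =====
-- def interpretPreferenceRule(preference, attributes):
--     preferenceScores = {}
--     score = len(preference)
--     for pref in preference:
--         for attribute, values in attributes.items():
--             if pref in values:
--                 preferenceScores[attribute] = score
--                 break
--         score -= 1
--     return preferenceScores
-- ===== SOURCE B (Python) =====
-- def interpretPreferenceRule(preference, attributes):
--     # Index pass: positions of each value in the preference list, in order.
--     positions = {}
--     for i, p in enumerate(preference):
--         positions.setdefault(p, []).append(i)
--     # Ownership pass (attribute-major): a value belongs to the first attribute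
--     # listing it; mark every position of a freshly owned value with its owner.
--     P = len(preference)
--     claimed = [None] * P
--     seen = set()
--     for attribute, values in attributes.items():
--         for v in values:
--             if v not in seen:
--                 seen.add(v)
--                 for i in positions.get(v, []):
--                     claimed[i] = attribute
--     # Emission pass: ascending positions; a later position for the same attribute
--     # overwrites the score while the first keeps the dict position.
--     result = {}
--     for i, attr in enumerate(claimed):
--         if attr is not None:
--             result[attr] = P - i
--     return result
-- ===== Notes on version B (the rewrite author's own statement) =====
-- stated objective: faster
-- what changed: B is attribute-major instead of preference-major: one pass over the attributes marks each value as owned by the first attribute listing it and fills a positional 'claimed' array over the preferences, then a single positional pass emits the dict, so A's per-preference rescan of all attribute value lists disappears.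
import Mathlib
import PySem

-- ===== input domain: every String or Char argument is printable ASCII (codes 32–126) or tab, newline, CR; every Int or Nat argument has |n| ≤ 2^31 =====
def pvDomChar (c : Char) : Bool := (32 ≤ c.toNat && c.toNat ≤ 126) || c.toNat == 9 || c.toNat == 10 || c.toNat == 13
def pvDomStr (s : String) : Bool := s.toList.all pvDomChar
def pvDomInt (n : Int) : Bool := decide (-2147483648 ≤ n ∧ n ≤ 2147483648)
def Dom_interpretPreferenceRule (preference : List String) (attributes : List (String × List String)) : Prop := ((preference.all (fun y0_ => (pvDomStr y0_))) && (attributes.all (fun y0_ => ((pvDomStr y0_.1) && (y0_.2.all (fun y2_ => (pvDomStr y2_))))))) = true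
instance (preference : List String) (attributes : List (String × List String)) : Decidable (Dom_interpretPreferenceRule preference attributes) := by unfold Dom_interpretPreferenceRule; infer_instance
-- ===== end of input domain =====

-- ===== PORT A =====
-- A is preference-major (for each preference, rescan the attributes until one
-- contains it); B builds a value→positions index and marks ownership
-- attribute-major, then emits positions in ascending order. Same return value.
def pvInnerA (pref : String) (score : Int) (scores : PySem.Dict String Int) :
    List (String × List String) → PySem.Dict String Int
  | [] => scores
  | (attrName, values) :: rest =>
      if pref ∈ values then scores.insert attrName score
      else pvInnerA pref score scores rest

def pvLoopA (attributes : List (String × List String)) :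
    List String → PySem.Dict String Int → Int → PySem.Dict String Int
  | [], scores, _ => scores
  | pref :: rest, scores, score =>
      pvLoopA attributes rest (pvInnerA pref score scores attributes) (score - 1)

def interpretPreferenceRule (preference : List String) (attributes : List (String × List String)) : List (String × Int) :=
  (pvLoopA attributes preference PySem.Dict.empty (preference.length : Int)).items

-- ===== PORT B =====
-- Source B's index pass: positions[p] = list of indices of p in preference.
def pvPositions (prefs : List String) : PySem.Dict String (List Int) :=
  (PySem.List.enumerate prefs 0).foldl
    (fun d ip => d.modify ip.2 [] (· ++ [ip.1])) PySem.Dict.empty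

-- Source B's inner 'for v in values' body: skip seen values, mark positions of fresh ones.
def pvMarkVal (positions : PySem.Dict String (List Int)) (attrName : String)
    (sc : PySem.Set String × List (Option String)) (v : String) :
    PySem.Set String × List (Option String) :=
  if PySem.Set.contains sc.1 v then sc
  else (PySem.Set.add sc.1 v,
        (positions.getD v []).foldl (fun cl i => cl.set i.toNat (some attrName)) sc.2)

-- Source B's ownership pass over the attributes.
def pvMark (positions : PySem.Dict String (List Int)) :
    List (String × List String) → PySem.Set String × List (Option String) →
      PySem.Set String × List (Option String)
  | [], sc => sc
  | (attrName, values) :: rest, sc =>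
      pvMark positions rest (values.foldl (pvMarkVal positions attrName) sc)

def interpretPreferenceRule_alt (preference : List String) (attributes : List (String × List String)) : List (String × Int) :=
  ((PySem.List.enumerate ((pvMark (pvPositions preference) attributes
      (PySem.Set.empty, List.replicate preference.length none)).2) 0).foldl
    (fun r ic =>
      match ic.2 with
      | some a => r.insert a ((preference.length : Int) - ic.1)
      | none => r) PySem.Dict.empty).items

-- ===== PRECONDITION & SPEC =====
def Spec_interpretPreferenceRule (preference : List String) (attributes : List (String × List String)) (out : List (String × Int)) : Prop := out = interpretPreferenceRule_alt preference attributes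
instance (preference : List String) (attributes : List (String × List String)) (out : List (String × Int)) : Decidable (Spec_interpretPreferenceRule preference attributes out) := by unfold Spec_interpretPreferenceRule; infer_instance

-- ===== CLAIM (what is proved, stated in full; the proofs are below) =====
def Claim_equal_interpretPreferenceRule : Prop := ∀ (preference : List String) (attributes : List (String × List String)), Dom_interpretPreferenceRule preference attributes → Spec_interpretPreferenceRule preference attributes (interpretPreferenceRule preference attributes)

-- ===== LEMMAS AND PROOFS =====

-- First attribute (in order) whose value list contains pref — what A's inner scan finds.
def pvFirstAttr (pref : String) : List (String × List String) → Option String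
  | [] => none
  | (a, vs) :: rest => if pref ∈ vs then some a else pvFirstAttr pref rest

theorem pvInnerA_eq_firstAttr (pref : String) (score : Int) (scores : PySem.Dict String Int)
    (attrs : List (String × List String)) :
    pvInnerA pref score scores attrs =
      match pvFirstAttr pref attrs with
      | some a => scores.insert a score
      | none => scores := by
  induction attrs with
  | nil => rfl
  | cons p rest ih =>
      obtain ⟨a, vs⟩ := p
      by_cases h : pref ∈ vs <;> simp [pvInnerA, pvFirstAttr, h, ih]

-- The positions dictionary lists, for each value, its indices in the preference list.
theorem pvPositions_getD (prefs : List String) (v : String) :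
    (pvPositions prefs).getD v [] =
      ((PySem.List.enumerate prefs 0).filter (fun ip => ip.2 == v)).map (·.1) := by
  unfold pvPositions
  have h : (PySem.List.enumerate prefs 0).foldl
      (fun d ip => d.modify ip.2 [] (· ++ [ip.1])) PySem.Dict.empty =
      ((PySem.List.enumerate prefs 0).map (fun ip => (ip.2, ip.1))).foldl
        (fun d p => d.modify p.1 [] (· ++ [p.2])) PySem.Dict.empty := by
    rw [List.foldl_map]
  rw [h, PySem.Dict.getD_foldl_modify_append, PySem.Dict.getD_empty, List.nil_append,
    List.filter_map, List.map_map]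
  rfl

theorem pvPositions_mem (prefs : List String) (v : String) (j : Int) :
    j ∈ (pvPositions prefs).getD v [] ↔
      ∃ k : Nat, k < prefs.length ∧ j = (k : Int) ∧ prefs[k]? = some v := by
  rw [pvPositions_getD]
  simp only [List.mem_map, List.mem_filter, PySem.List.mem_enumerate_iff]
  constructor
  · rintro ⟨⟨i, p⟩, ⟨⟨k, hk, hkp⟩, hpv⟩, hj⟩
    cases hkp
    refine ⟨k, hk, by simpa using hj.symm, ?_⟩
    simp only [beq_iff_eq] at hpv
    simp [List.getElem?_eq_getElem hk, hpv]
  · rintro ⟨k, hk, hj, hv⟩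
    refine ⟨((k : Int), prefs[k]), ⟨⟨k, hk, by simp⟩, ?_⟩, by simpa using hj.symm⟩
    have hv2 : prefs[k] = v := by
      rw [List.getElem?_eq_getElem hk] at hv
      exact Option.some.inj hv
    simp [hv2]

-- Writing x at a list of valid indices, read back positionally.
theorem pvSetAll_getElem? {x : Option String} (idxs : List Int) :
    ∀ (cl : List (Option String)) (k : Nat),
      (∀ i ∈ idxs, 0 ≤ i ∧ i.toNat < cl.length) →
      (idxs.foldl (fun cl i => cl.set i.toNat x) cl)[k]? =
        if (k : Int) ∈ idxs then some x else cl[k]? := by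
  induction idxs with
  | nil => intro cl k _; simp
  | cons i rest ih =>
      intro cl k hvalid
      have hi := hvalid i (by simp)
      rw [List.foldl_cons, ih (cl.set i.toNat x) k
        (fun i' hi' => by
          have := hvalid i' (by simp [hi'])
          simpa [List.length_set] using this)]
      by_cases hmem : (k : Int) ∈ rest
      · simp [hmem]
      · rw [if_neg hmem, List.getElem?_set]
        by_cases hik : i.toNat = k
        · rw [if_pos hik, if_pos (show i.toNat < cl.length from hi.2)]
          have hm : (k : Int) ∈ i :: rest := by
            rw [List.mem_cons]
            left
            omega
          rw [if_pos hm]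
        · rw [if_neg hik]
          have hm : (k : Int) ∉ i :: rest := by
            rw [List.mem_cons]
            rintro (h | h)
            · omega
            · exact hmem h
          rw [if_neg hm]

theorem pvSetAll_length (x : Option String) (idxs : List Int) :
    ∀ cl : List (Option String),
      (idxs.foldl (fun cl i => cl.set i.toNat x) cl).length = cl.length := by
  induction idxs with
  | nil => intro cl; rfl
  | cons i rest ih => intro cl; rw [List.foldl_cons, ih, List.length_set]

-- The inner values loop: seen picks up the values, claimed picks up the owner
-- at every position whose preference is a freshly seen value.
theorem pvValuesLoop (prefs : List String) (attrName : String) (vs : List String) :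
    ∀ (seen : PySem.Set String) (cl : List (Option String)),
      cl.length = prefs.length →
      (vs.foldl (pvMarkVal (pvPositions prefs) attrName) (seen, cl)).1 =
          PySem.Set.update seen vs ∧
      (vs.foldl (pvMarkVal (pvPositions prefs) attrName) (seen, cl)).2.length = prefs.length ∧
      ∀ (k : Nat) (hk : k < prefs.length),
        (vs.foldl (pvMarkVal (pvPositions prefs) attrName) (seen, cl)).2[k]? =
          if prefs[k] ∈ vs ∧ prefs[k] ∉ seen then some (some attrName) else cl[k]? := by
  induction vs with
  | nil =>
      intro seen cl hlen
      refine ⟨rfl, hlen, fun k hk => ?_⟩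
      simp
  | cons v rest ih =>
      intro seen cl hlen
      rw [List.foldl_cons]
      by_cases hv : PySem.Set.contains seen v
      · have hvmem : v ∈ seen := (PySem.Set.contains_iff seen v).mp hv
        have hstep : pvMarkVal (pvPositions prefs) attrName (seen, cl) v = (seen, cl) := by
          simp [pvMarkVal, hvmem]
        rw [hstep]
        obtain ⟨h1, h2, h3⟩ := ih seen cl hlen
        refine ⟨by rw [h1, PySem.Set.update_cons, PySem.Set.add_of_mem hvmem], h2, ?_⟩
        intro k hk
        rw [h3 k hk]
        by_cases hpv : prefs[k] = v
        · simp [hpv, hvmem]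
        · simp [hpv]
      · have hvnmem : v ∉ seen := fun h => hv ((PySem.Set.contains_iff seen v).mpr h)
        have hstep : pvMarkVal (pvPositions prefs) attrName (seen, cl) v =
            (PySem.Set.add seen v,
             ((pvPositions prefs).getD v []).foldl
               (fun cl i => cl.set i.toNat (some attrName)) cl) := by
          simp [pvMarkVal, hvnmem]
        rw [hstep]
        have hvalid : ∀ i ∈ (pvPositions prefs).getD v [], 0 ≤ i ∧ i.toNat < cl.length := by
          intro i hi
          obtain ⟨k, hk, hik, _⟩ := (pvPositions_mem prefs v i).mp hi
          constructor
          · omega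
          · rw [hlen]; omega
        have hclen : (((pvPositions prefs).getD v []).foldl
            (fun cl i => cl.set i.toNat (some attrName)) cl).length = prefs.length := by
          rw [pvSetAll_length]; exact hlen
        obtain ⟨h1, h2, h3⟩ := ih (PySem.Set.add seen v) _ hclen
        refine ⟨by rw [h1, PySem.Set.update_cons], h2, ?_⟩
        intro k hk
        rw [h3 k hk, pvSetAll_getElem? _ cl k hvalid]
        have hkmem : ((k : Int) ∈ (pvPositions prefs).getD v []) ↔ prefs[k] = v := by
          rw [pvPositions_mem]
          constructor
          · rintro ⟨k', hk', hkk', hv'⟩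
            have : k = k' := by omega
            subst this
            rw [List.getElem?_eq_getElem hk] at hv'
            exact Option.some.inj hv'
          · intro h
            exact ⟨k, hk, rfl, by rw [List.getElem?_eq_getElem hk, h]⟩
        by_cases hpv : prefs[k] = v
        · have hidx : (k : Int) ∈ (pvPositions prefs).getD v [] := hkmem.mpr hpv
          have hnotseen : prefs[k] ∉ seen := hpv ▸ hvnmem
          have hcond2 : prefs[k] ∈ v :: rest ∧ prefs[k] ∉ seen :=
            ⟨by rw [List.mem_cons]; left; exact hpv, hnotseen⟩
          rw [if_pos hcond2]
          have hnadd : prefs[k] ∈ PySem.Set.add seen v := by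
            rw [PySem.Set.mem_add]; right; exact hpv
          have hcond1 : ¬ (prefs[k] ∈ rest ∧ prefs[k] ∉ PySem.Set.add seen v) :=
            fun h => h.2 hnadd
          rw [if_neg hcond1, if_pos hidx]
        · have hidx : (k : Int) ∉ (pvPositions prefs).getD v [] :=
            fun h => hpv (hkmem.mp h)
          rw [if_neg hidx]
          have hmemadd : prefs[k] ∈ PySem.Set.add seen v ↔ prefs[k] ∈ seen := by
            rw [PySem.Set.mem_add]
            constructor
            · rintro (h | h)
              · exact h
              · exact absurd h hpv
            · exact Or.inl
          by_cases hrest : prefs[k] ∈ rest ∧ prefs[k] ∉ seen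
          · have hc1 : prefs[k] ∈ rest ∧ prefs[k] ∉ PySem.Set.add seen v :=
              ⟨hrest.1, fun h => hrest.2 (hmemadd.mp h)⟩
            rw [if_pos hc1]
            have hc2 : prefs[k] ∈ v :: rest ∧ prefs[k] ∉ seen :=
              ⟨List.mem_cons_of_mem _ hrest.1, hrest.2⟩
            rw [if_pos hc2]
          · have hc1 : ¬ (prefs[k] ∈ rest ∧ prefs[k] ∉ PySem.Set.add seen v) :=
              fun h => hrest ⟨h.1, fun hs => h.2 (hmemadd.mpr hs)⟩
            rw [if_neg hc1]
            have hc2 : ¬ (prefs[k] ∈ v :: rest ∧ prefs[k] ∉ seen) := by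
              rintro ⟨hm, hs⟩
              rcases List.mem_cons.mp hm with h | h
              · exact hpv h
              · exact hrest ⟨h, hs⟩
            rw [if_neg hc2]

-- The ownership pass computes, positionally, the first attribute containing each preference.
theorem pvMark_getElem? (prefs : List String) :
    ∀ (attrs : List (String × List String)) (seen : PySem.Set String)
      (cl : List (Option String)), cl.length = prefs.length →
      (pvMark (pvPositions prefs) attrs (seen, cl)).2.length = prefs.length ∧
      ∀ (k : Nat) (hk : k < prefs.length),
        (pvMark (pvPositions prefs) attrs (seen, cl)).2[k]? =
          if prefs[k] ∈ seen then cl[k]?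
          else match pvFirstAttr prefs[k] attrs with
               | some a => some (some a)
               | none => cl[k]? := by
  intro attrs
  induction attrs with
  | nil =>
      intro seen cl hlen
      refine ⟨hlen, fun k hk => ?_⟩
      by_cases h : prefs[k] ∈ seen <;> simp [pvMark, pvFirstAttr, h]
  | cons pr rest ih =>
      intro seen cl hlen
      obtain ⟨attrName, values⟩ := pr
      obtain ⟨hv1, hv2, hv3⟩ := pvValuesLoop prefs attrName values seen cl hlen
      have hpair : values.foldl (pvMarkVal (pvPositions prefs) attrName) (seen, cl) =
          (PySem.Set.update seen values,
           (values.foldl (pvMarkVal (pvPositions prefs) attrName) (seen, cl)).2) := by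
        rw [← hv1]
      have hunf : pvMark (pvPositions prefs) ((attrName, values) :: rest) (seen, cl) =
          pvMark (pvPositions prefs) rest
            (PySem.Set.update seen values,
             (values.foldl (pvMarkVal (pvPositions prefs) attrName) (seen, cl)).2) := by
        show pvMark (pvPositions prefs) rest
            (values.foldl (pvMarkVal (pvPositions prefs) attrName) (seen, cl)) = _
        rw [hpair]
      rw [hunf]
      obtain ⟨h1, h2⟩ := ih (PySem.Set.update seen values) _ hv2
      refine ⟨h1, fun k hk => ?_⟩
      rw [h2 k hk, hv3 k hk]
      by_cases hseen : prefs[k] ∈ seen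
      · have hup : prefs[k] ∈ PySem.Set.update seen values := by
          rw [PySem.Set.mem_update]; left; exact hseen
        rw [if_pos hup, if_pos hseen]
        have hc : ¬ (prefs[k] ∈ values ∧ prefs[k] ∉ seen) := fun h => h.2 hseen
        rw [if_neg hc]
      · rw [if_neg hseen]
        by_cases hval : prefs[k] ∈ values
        · have hup : prefs[k] ∈ PySem.Set.update seen values := by
            rw [PySem.Set.mem_update]; right; exact hval
          rw [if_pos hup, if_pos ⟨hval, hseen⟩]
          have hfa : pvFirstAttr prefs[k] ((attrName, values) :: rest) = some attrName := by
            simp [pvFirstAttr, hval]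
          rw [hfa]
        · have hup : prefs[k] ∉ PySem.Set.update seen values := by
            rw [PySem.Set.mem_update]
            rintro (h | h)
            · exact hseen h
            · exact hval h
          rw [if_neg hup]
          have hfa : pvFirstAttr prefs[k] ((attrName, values) :: rest) =
              pvFirstAttr prefs[k] rest := by
            simp [pvFirstAttr, hval]
          rw [hfa]
          have hc : ¬ (prefs[k] ∈ values ∧ prefs[k] ∉ seen) := fun h => hval h.1
          rw [if_neg hc]

-- The claimed list is, pointwise, the first attribute containing each preference.
theorem pvClaimed_eq_map (prefs : List String) (attrs : List (String × List String)) :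
    (pvMark (pvPositions prefs) attrs
        (PySem.Set.empty, List.replicate prefs.length none)).2 =
      prefs.map (fun p => pvFirstAttr p attrs) := by
  obtain ⟨h1, h2⟩ := pvMark_getElem? prefs attrs PySem.Set.empty
    (List.replicate prefs.length none) (by simp)
  apply List.ext_getElem?
  intro k
  by_cases hk : k < prefs.length
  · rw [h2 k hk]
    have hmap : (prefs.map (fun p => pvFirstAttr p attrs))[k]? =
        some (pvFirstAttr prefs[k] attrs) := by
      simp [List.getElem?_eq_getElem, hk]
    rw [hmap]
    have hemp : prefs[k] ∉ PySem.Set.empty := by simp [PySem.Set.empty]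
    rw [if_neg hemp]
    cases pvFirstAttr prefs[k] attrs <;> simp [hk]
  · have hk1 : (pvMark (pvPositions prefs) attrs
        (PySem.Set.empty, List.replicate prefs.length none)).2.length ≤ k := by omega
    have hk2 : (prefs.map (fun p => pvFirstAttr p attrs)).length ≤ k := by
      simp; omega
    rw [List.getElem?_eq_none hk1, List.getElem?_eq_none hk2]

-- A's loop as a fold over the enumerated firstAttr list.
theorem pvLoopA_eq_fold (attrs : List (String × List String)) (P : Int) :
    ∀ (prefs : List String) (scores : PySem.Dict String Int) (k : Int),
      pvLoopA attrs prefs scores (P - k) =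
        (PySem.List.enumerate (prefs.map (fun p => pvFirstAttr p attrs)) k).foldl
          (fun r ic =>
            match ic.2 with
            | some a => r.insert a (P - ic.1)
            | none => r) scores := by
  intro prefs
  induction prefs with
  | nil => intro scores k; rfl
  | cons p rest ih =>
      intro scores k
      rw [List.map_cons, PySem.List.enumerate_cons, List.foldl_cons]
      show pvLoopA attrs rest (pvInnerA p (P - k) scores attrs) (P - k - 1) = _
      have : P - k - 1 = P - (k + 1) := by ring
      rw [this, ih]
      congr 1
      rw [pvInnerA_eq_firstAttr]

-- ===== VERDICT (by name: the statement is the Claim_ definition above) =====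
theorem interpretPreferenceRule_spec : Claim_equal_interpretPreferenceRule := by
  intro preference attributes _
  unfold Spec_interpretPreferenceRule interpretPreferenceRule interpretPreferenceRule_alt
  rw [pvClaimed_eq_map]
  have := pvLoopA_eq_fold attributes (preference.length : Int) preference PySem.Dict.empty 0
  rw [sub_zero] at this
  rw [this]
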